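-- pv_equiv track=rewrite | github.com/hinxx/uhvd-masc-firmware-decode | dsp56800e_decoder.py | find_candidate_words
-- ===== SOURCE A (Python) =====
-- from typing import Iterable, Sequence
--
-- def find_candidate_words(pair_rows: Sequence[tuple[int, int, int, int]],
--                          target: int,
--                          existing_anchors: Iterable[tuple[int, int]] = (),
--                          search_range: tuple[int, int] | None = None,
--                          nibble_order: tuple[int, int, int, int] = (0, 1, 2, 3),
--                          ) -> list[int]:
--     """Find every codeword index where assuming the codeword == `target`
--     is consistent with the existing anchor mappings (no contradictions
--     on already-pinned pair-ids).
--
--     Args: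
--         pair_rows: pair-id stream.
--         target: 16-bit value to search for.
--         existing_anchors: already-known anchors, used to constrain.
--         search_range: (start, end) codeword indices to search; defaults
--             to whole stream.
--         nibble_order: per-byte-position nibble layout.
--
--     Returns:
--         List of candidate codeword indices (could be empty, one, or many).
--         Use these to narrow down where a specific known value is located.
--
--     Example:
--         # Find all positions where assuming the codeword = 0xE70A is
--         # consistent with the FFFF anchor we already have.
--         candidates = find_candidate_words(rows, 0xE70A,
--                                           existing_anchors=[(43250, 0xFFFF)])
--     """
--     # Build per-position pair-id -> nibble constraints from existing anchors.
--     pinned = [{} for _ in range(4)]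
--     used_nibs = [set() for _ in range(4)]
--     for cw_idx, w in existing_anchors:
--         for p in range(4):
--             shift = 12 - 4 * nibble_order[p]
--             nb = (w >> shift) & 0xF
--             pid = pair_rows[cw_idx][p]
--             if pid in pinned[p] and pinned[p][pid] != nb:
--                 # Contradictory anchors — skip; we'd have caught this elsewhere.
--                 pass
--             pinned[p][pid] = nb
--             used_nibs[p].add(nb)
--
--     # Compute target nibbles
--     target_nibs = [(target >> (12 - 4 * nibble_order[p])) & 0xF
--                    for p in range(4)]
--
--     lo, hi = search_range or (0, len(pair_rows))
--     candidates = []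
--     for i in range(lo, hi):
--         cw = pair_rows[i]
--         ok = True
--         for p in range(4):
--             pid = cw[p]
--             tnib = target_nibs[p]
--             if pid in pinned[p]:
--                 # Pinned: must equal target nibble.
--                 if pinned[p][pid] != tnib:
--                     ok = False
--                     break
--             else:
--                 # Unpinned: target nibble must not already be used by
--                 # another pinned pair-id at this position.
--                 if tnib in used_nibs[p]:
--                     ok = False
--                     break
--         if ok:
--             candidates.append(i)
--     return candidates
-- ===== SOURCE B (Python) =====
-- def find_candidate_words(pair_rows, target, existing_anchors=(), search_range=None,
--                          nibble_order=(0, 1, 2, 3)):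
--     """Position-major staged sieving: start from the whole index range and, for
--     each of the 4 nibble positions in turn, filter the surviving candidate list
--     with that position's single acceptance test (built once from the anchors)."""
--     anchors = list(existing_anchors)
--     lo, hi = search_range or (0, len(pair_rows))
--     candidates = list(range(lo, hi))
--     for p in range(4):
--         shift = 12 - 4 * nibble_order[p]
--         pinned = {}
--         used = set()
--         for cw_idx, w in anchors:
--             nb = (w >> shift) & 0xF
--             pinned[pair_rows[cw_idx][p]] = nb
--             used.add(nb)
--         tnib = (target >> shift) & 0xF
--         if tnib in used:
--             # target nibble already taken at p: only pair-ids pinned to exactly tnib survive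
--             allowed = {pid for pid, nb in pinned.items() if nb == tnib}
--             candidates = [i for i in candidates if pair_rows[i][p] in allowed]
--         else:
--             # target nibble unused at p: any unpinned pair-id survives
--             candidates = [i for i in candidates if pair_rows[i][p] not in pinned]
--     return candidates
-- ===== Notes on version B (the rewrite author's own statement) =====
-- stated objective: alternative
-- what changed: B inverts the traversal: instead of A's candidate-major single scan that re-runs the 4-position pinned/used branch logic per candidate with early break, B does position-major staged sieving - for each of the 4 positions it builds that position's constraints once, chooses one acceptance test (membership in the pair-ids pinned to the target nibble, or absence from the pinned keys), and filters the shrinking candidate list, so the output is the survivors of four successive passes.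
import Mathlib
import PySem

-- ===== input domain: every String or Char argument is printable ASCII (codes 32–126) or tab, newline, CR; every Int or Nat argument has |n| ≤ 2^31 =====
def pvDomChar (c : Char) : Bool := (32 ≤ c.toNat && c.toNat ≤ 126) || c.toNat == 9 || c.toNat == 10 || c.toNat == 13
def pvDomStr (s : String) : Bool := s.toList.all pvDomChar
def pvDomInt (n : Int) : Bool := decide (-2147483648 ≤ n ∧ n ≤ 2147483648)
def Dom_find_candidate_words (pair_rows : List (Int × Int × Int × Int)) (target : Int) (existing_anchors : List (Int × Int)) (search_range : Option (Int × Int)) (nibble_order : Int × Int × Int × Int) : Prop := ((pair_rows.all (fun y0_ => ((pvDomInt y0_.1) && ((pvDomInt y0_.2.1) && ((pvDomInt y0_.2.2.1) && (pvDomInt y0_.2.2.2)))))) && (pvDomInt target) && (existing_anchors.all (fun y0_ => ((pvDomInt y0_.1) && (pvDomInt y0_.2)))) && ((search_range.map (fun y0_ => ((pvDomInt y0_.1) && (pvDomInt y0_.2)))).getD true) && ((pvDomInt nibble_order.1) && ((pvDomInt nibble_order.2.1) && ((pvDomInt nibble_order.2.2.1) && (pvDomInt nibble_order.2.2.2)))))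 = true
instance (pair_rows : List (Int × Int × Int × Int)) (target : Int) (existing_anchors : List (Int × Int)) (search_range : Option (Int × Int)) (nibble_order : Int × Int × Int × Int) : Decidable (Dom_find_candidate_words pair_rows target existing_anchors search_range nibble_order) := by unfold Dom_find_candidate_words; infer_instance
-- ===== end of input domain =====

-- B replaces A's candidate-major scan (per-candidate 4-position pinned/used branch logic with
-- early break) by position-major staged sieving: four successive filter passes over a shrinking
-- candidate list, one precomputed acceptance test per pass (objective: alternative decomposition).
-- ===== PORT A =====
-- (w >> (12 - 4*o)) & 0xF ; the Nat shift is exact for o ≤ 3 (Pre_); Python raises ValueError for o > 3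
def fcwA_nib (w : Int) (o : Int) : Int := PySem.Int.band (w >>> (12 - 4 * o).toNat) 15

-- the body of A's anchor loop at one position (the 'contradictory anchors' branch is a no-op 'pass')
def fcwA_upd (pr : PySem.Dict Int Int × PySem.Set Int) (pid nb : Int) :
    PySem.Dict Int Int × PySem.Set Int :=
  (pr.1.insert pid nb, pr.2.add nb)

-- A's per-candidate, per-position test: pinned ⇒ equal tnib, unpinned ⇒ tnib unused
def fcwA_ok (pr : PySem.Dict Int Int × PySem.Set Int) (pid tnib : Int) : Bool :=
  match pr.1.get? pid with
  | some v => v == tnib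
  | none => !(pr.2.contains tnib)

def find_candidate_words (pair_rows : List (Int × Int × Int × Int)) (target : Int) (existing_anchors : List (Int × Int)) (search_range : Option (Int × Int)) (nibble_order : Int × Int × Int × Int) : List Int :=
  let st := existing_anchors.foldl (fun st a =>
      let row := PySem.List.pyGetD pair_rows a.1 (0, 0, 0, 0)
      (fcwA_upd st.1 row.1 (fcwA_nib a.2 nibble_order.1),
       fcwA_upd st.2.1 row.2.1 (fcwA_nib a.2 nibble_order.2.1),
       fcwA_upd st.2.2.1 row.2.2.1 (fcwA_nib a.2 nibble_order.2.2.1),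
       fcwA_upd st.2.2.2 row.2.2.2 (fcwA_nib a.2 nibble_order.2.2.2)))
    ((PySem.Dict.empty, PySem.Set.empty), (PySem.Dict.empty, PySem.Set.empty),
     (PySem.Dict.empty, PySem.Set.empty), (PySem.Dict.empty, PySem.Set.empty))
  -- 'search_range or (0, len(pair_rows))': a 2-tuple is always truthy, so only None defaults
  let lohi := search_range.getD (0, (pair_rows.length : Int))
  (PySem.List.pyRange lohi.1 lohi.2 1).foldl (fun acc i =>
      let cw := PySem.List.pyGetD pair_rows i (0, 0, 0, 0)
      if fcwA_ok st.1 cw.1 (fcwA_nib target nibble_order.1) &&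
         fcwA_ok st.2.1 cw.2.1 (fcwA_nib target nibble_order.2.1) &&
         fcwA_ok st.2.2.1 cw.2.2.1 (fcwA_nib target nibble_order.2.2.1) &&
         fcwA_ok st.2.2.2 cw.2.2.2 (fcwA_nib target nibble_order.2.2.2)
      then acc ++ [i] else acc) []

-- ===== PORT B =====
def fcwB_nib (w : Int) (o : Int) : Int := PySem.Int.band (w >>> (12 - 4 * o).toNat) 15

-- one iteration of B's position loop: build pinned/used for position p, pick the one
-- acceptance test, and filter the surviving candidate list with it
def fcwB_pass (pair_rows : List (Int × Int × Int × Int)) (anchors : List (Int × Int))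
    (target : Int) (o : Int) (proj : Int × Int × Int × Int → Int) (cands : List Int) : List Int :=
  let pu := anchors.foldl (fun pu a =>
      (pu.1.insert (proj (PySem.List.pyGetD pair_rows a.1 (0, 0, 0, 0))) (fcwB_nib a.2 o),
       pu.2.add (fcwB_nib a.2 o)))
    ((PySem.Dict.empty : PySem.Dict Int Int), (PySem.Set.empty : PySem.Set Int))
  let tnib := fcwB_nib target o
  if pu.2.contains tnib then
    let allowed := PySem.Set.ofList ((pu.1.items.filter (fun kv => kv.2 == tnib)).map (·.1))
    cands.filter (fun i => allowed.contains (proj (PySem.List.pyGetD pair_rows i (0, 0, 0, 0))))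
  else
    cands.filter (fun i => (pu.1.get? (proj (PySem.List.pyGetD pair_rows i (0, 0, 0, 0)))).isNone)

def find_candidate_words_alt (pair_rows : List (Int × Int × Int × Int)) (target : Int) (existing_anchors : List (Int × Int)) (search_range : Option (Int × Int)) (nibble_order : Int × Int × Int × Int) : List Int :=
  let lohi := search_range.getD (0, (pair_rows.length : Int))
  fcwB_pass pair_rows existing_anchors target nibble_order.2.2.2 (·.2.2.2)
    (fcwB_pass pair_rows existing_anchors target nibble_order.2.2.1 (·.2.2.1)
      (fcwB_pass pair_rows existing_anchors target nibble_order.2.1 (·.2.1)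
        (fcwB_pass pair_rows existing_anchors target nibble_order.1 (·.1)
          (PySem.List.pyRange lohi.1 lohi.2 1))))

-- ===== PRECONDITION & SPEC =====
-- Pre_ excludes exactly the inputs where the Python A raises: an anchor index outside
-- pair_rows (IndexError), a non-empty search range reaching outside pair_rows (IndexError),
-- and a nibble_order component > 3 (negative shift count, ValueError).
def Pre_find_candidate_words (pair_rows : List (Int × Int × Int × Int)) (target : Int) (existing_anchors : List (Int × Int)) (search_range : Option (Int × Int)) (nibble_order : Int × Int × Int × Int) : Prop :=
  (∀ a ∈ existing_anchors, PySem.Raise.InRange pair_rows.length a.1) ∧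
  ((search_range.getD (0, (pair_rows.length : Int))).2 ≤ (search_range.getD (0, (pair_rows.length : Int))).1 ∨
   (-(pair_rows.length : Int) ≤ (search_range.getD (0, (pair_rows.length : Int))).1 ∧
    (search_range.getD (0, (pair_rows.length : Int))).2 ≤ (pair_rows.length : Int))) ∧
  nibble_order.1 ≤ 3 ∧ nibble_order.2.1 ≤ 3 ∧ nibble_order.2.2.1 ≤ 3 ∧ nibble_order.2.2.2 ≤ 3
instance (pair_rows : List (Int × Int × Int × Int)) (target : Int) (existing_anchors : List (Int × Int)) (search_range : Option (Int × Int)) (nibble_order : Int × Int × Int × Int) : Decidable (Pre_find_candidate_words pair_rows target existing_anchors search_range nibble_order) := by unfold Pre_find_candidate_words; infer_instance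

def pvWitness_find_candidate_words : (List (Int × Int × Int × Int)) × Int × (List (Int × Int)) × (Option (Int × Int)) × (Int × Int × Int × Int) :=
  ([(1, 2, 3, 4), (5, 6, 7, 8)], 59138, [(0, 65535)], none, (0, 1, 2, 3))

def Spec_find_candidate_words (pair_rows : List (Int × Int × Int × Int)) (target : Int) (existing_anchors : List (Int × Int)) (search_range : Option (Int × Int)) (nibble_order : Int × Int × Int × Int) (out : List Int) : Prop := out = find_candidate_words_alt pair_rows target existing_anchors search_range nibble_order
instance (pair_rows : List (Int × Int × Int × Int)) (target : Int) (existing_anchors : List (Int × Int)) (search_range : Option (Int × Int)) (nibble_order : Int × Int × Int × Int) (out : List Int) : Decidable (Spec_find_candidate_words pair_rows target existing_anchors search_range nibble_order out) := by unfold Spec_find_candidate_words; infer_instance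

-- ===== CLAIM (what is proved, stated in full; the proofs are below) =====
def Claim_equal_find_candidate_words : Prop := ∀ (pair_rows : List (Int × Int × Int × Int)) (target : Int) (existing_anchors : List (Int × Int)) (search_range : Option (Int × Int)) (nibble_order : Int × Int × Int × Int), Dom_find_candidate_words pair_rows target existing_anchors search_range nibble_order → Pre_find_candidate_words pair_rows target existing_anchors search_range nibble_order → Spec_find_candidate_words pair_rows target existing_anchors search_range nibble_order (find_candidate_words pair_rows target existing_anchors search_range nibble_order)

-- ===== LEMMAS AND PROOFS =====

-- the one-position step B's fold uses (proof-side abbreviation)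
def fcwStep (pair_rows : List (Int × Int × Int × Int)) (o : Int) (proj : Int × Int × Int × Int → Int)
    (pu : PySem.Dict Int Int × PySem.Set Int) (a : Int × Int) : PySem.Dict Int Int × PySem.Set Int :=
  (pu.1.insert (proj (PySem.List.pyGetD pair_rows a.1 (0, 0, 0, 0))) (fcwB_nib a.2 o),
   pu.2.add (fcwB_nib a.2 o))

-- A's 4-position fold projects to B's per-position folds
theorem fcwA_fold_proj (pair_rows : List (Int × Int × Int × Int)) (nibble_order : Int × Int × Int × Int)
    (l : List (Int × Int)) (st : (PySem.Dict Int Int × PySem.Set Int) × (PySem.Dict Int Int × PySem.Set Int) × (PySem.Dict Int Int × PySem.Set Int) × (PySem.Dict Int Int × PySem.Set Int)) :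
    l.foldl (fun st a =>
      let row := PySem.List.pyGetD pair_rows a.1 (0, 0, 0, 0)
      (fcwA_upd st.1 row.1 (fcwA_nib a.2 nibble_order.1),
       fcwA_upd st.2.1 row.2.1 (fcwA_nib a.2 nibble_order.2.1),
       fcwA_upd st.2.2.1 row.2.2.1 (fcwA_nib a.2 nibble_order.2.2.1),
       fcwA_upd st.2.2.2 row.2.2.2 (fcwA_nib a.2 nibble_order.2.2.2))) st
    = (l.foldl (fcwStep pair_rows nibble_order.1 (·.1)) st.1,
       l.foldl (fcwStep pair_rows nibble_order.2.1 (·.2.1)) st.2.1,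
       l.foldl (fcwStep pair_rows nibble_order.2.2.1 (·.2.2.1)) st.2.2.1,
       l.foldl (fcwStep pair_rows nibble_order.2.2.2 (·.2.2.2)) st.2.2.2) := by
  induction l generalizing st with
  | nil => rfl
  | cons a l ih => simpa [List.foldl_cons, fcwStep, fcwA_upd, fcwA_nib, fcwB_nib] using ih _

-- the dict half of the per-position fold
theorem fcwStep_fst (pair_rows : List (Int × Int × Int × Int)) (o : Int) (proj : Int × Int × Int × Int → Int)
    (l : List (Int × Int)) (pu : PySem.Dict Int Int × PySem.Set Int) :
    (l.foldl (fcwStep pair_rows o proj) pu).1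
      = l.foldl (fun d a => d.insert (proj (PySem.List.pyGetD pair_rows a.1 (0, 0, 0, 0))) (fcwB_nib a.2 o)) pu.1 := by
  induction l generalizing pu with
  | nil => rfl
  | cons a l ih => simpa [fcwStep] using ih _

-- the set half of the per-position fold
theorem fcwStep_snd (pair_rows : List (Int × Int × Int × Int)) (o : Int) (proj : Int × Int × Int × Int → Int)
    (l : List (Int × Int)) (pu : PySem.Dict Int Int × PySem.Set Int) :
    (l.foldl (fcwStep pair_rows o proj) pu).2
      = l.foldl (fun s a => s.add (fcwB_nib a.2 o)) pu.2 := by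
  induction l generalizing pu with
  | nil => rfl
  | cons a l ih => simpa [fcwStep] using ih _

-- every value stored by the insert fold comes from the nibble stream (or the start dict)
theorem fcw_value_mem (pair_rows : List (Int × Int × Int × Int)) (o : Int) (proj : Int × Int × Int × Int → Int)
    (l : List (Int × Int)) (d0 : PySem.Dict Int Int) (k v : Int)
    (h : (l.foldl (fun d a => d.insert (proj (PySem.List.pyGetD pair_rows a.1 (0, 0, 0, 0))) (fcwB_nib a.2 o)) d0).get? k = some v) :
    d0.get? k = some v ∨ v ∈ l.map (fun a => fcwB_nib a.2 o) := by
  induction l generalizing d0 with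
  | nil => exact Or.inl h
  | cons a l ih =>
    rcases ih _ h with h' | h'
    · rw [PySem.Dict.get?_insert] at h'
      split at h'
      · exact Or.inr (by simp [Option.some.injEq] at h'; simp [h'])
      · exact Or.inl h'
    · exact Or.inr (by simp [h'])

-- used target nibble: A accepts iff pid is a key mapped to tnib, i.e. iff pid is in B's allowed set
theorem fcw_ok_true (d : PySem.Dict Int Int) (u : PySem.Set Int) (pid tnib : Int)
    (hn : d.keys.Nodup) (hc : u.contains tnib = true) :
    fcwA_ok (d, u) pid tnib
      = (PySem.Set.ofList ((d.items.filter (fun kv => kv.2 == tnib)).map (·.1))).contains pid := by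
  unfold fcwA_ok
  cases hget : d.get? pid with
  | none =>
    dsimp only
    simp only [hc, Bool.not_true]
    symm
    rw [Bool.eq_false_iff]
    intro hmem
    rw [PySem.Set.contains_iff, PySem.Set.mem_ofList] at hmem
    obtain ⟨kv, hkv, hfst⟩ := List.mem_map.mp hmem
    obtain ⟨hitems, _⟩ := List.mem_filter.mp hkv
    have := (PySem.Dict.get?_eq_some_iff_mem_items d kv.1 kv.2 hn).mpr hitems
    rw [hfst, hget] at this
    simp at this
  | some v =>
    dsimp only
    by_cases hv : v = tnib
    · subst hv
      symm
      rw [beq_self_eq_true]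
      rw [PySem.Set.contains_iff, PySem.Set.mem_ofList]
      exact List.mem_map.mpr ⟨(pid, v),
        List.mem_filter.mpr ⟨PySem.Dict.mem_items_of_get?_eq_some d hget, beq_self_eq_true v⟩, rfl⟩
    · symm
      rw [beq_eq_false_iff_ne.mpr hv, Bool.eq_false_iff]
      intro hmem
      rw [PySem.Set.contains_iff, PySem.Set.mem_ofList] at hmem
      obtain ⟨kv, hkv, hfst⟩ := List.mem_map.mp hmem
      obtain ⟨hitems, hbeq⟩ := List.mem_filter.mp hkv
      have h2 := (PySem.Dict.get?_eq_some_iff_mem_items d kv.1 kv.2 hn).mpr hitems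
      rw [hfst, hget] at h2
      exact hv (by
        have := Option.some.inj h2
        rw [← this] at hbeq
        exact eq_of_beq hbeq)

-- unused target nibble: A accepts iff pid is unpinned, i.e. iff B's dict lookup misses
theorem fcw_ok_false (d : PySem.Dict Int Int) (u : PySem.Set Int) (pid tnib : Int)
    (hv : ∀ v, d.get? pid = some v → u.contains v = true) (hc : u.contains tnib = false) :
    fcwA_ok (d, u) pid tnib = (d.get? pid).isNone := by
  unfold fcwA_ok
  cases hget : d.get? pid with
  | none =>
    dsimp only
    rw [hc]
    rfl
  | some v =>
    have hvne : v ≠ tnib := by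
      intro h
      have hvt := hv v hget
      rw [h, hc] at hvt
      exact Bool.false_ne_true hvt
    simp [beq_eq_false_iff_ne.mpr hvne]

-- one of B's sieving passes is exactly a filter by A's per-position test
theorem fcw_pass_eq (pair_rows : List (Int × Int × Int × Int)) (anchors : List (Int × Int))
    (target : Int) (o : Int) (proj : Int × Int × Int × Int → Int) (cands : List Int) :
    fcwB_pass pair_rows anchors target o proj cands
      = cands.filter (fun i =>
          fcwA_ok (anchors.foldl (fcwStep pair_rows o proj) (PySem.Dict.empty, PySem.Set.empty))
            (proj (PySem.List.pyGetD pair_rows i (0, 0, 0, 0))) (fcwB_nib target o)) := by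
  unfold fcwB_pass
  have hpu : (anchors.foldl (fun (pu : PySem.Dict Int Int × PySem.Set Int) (a : Int × Int) =>
      (pu.1.insert (proj (PySem.List.pyGetD pair_rows a.1 (0, 0, 0, 0))) (fcwB_nib a.2 o),
       pu.2.add (fcwB_nib a.2 o))) (PySem.Dict.empty, PySem.Set.empty))
      = anchors.foldl (fcwStep pair_rows o proj) (PySem.Dict.empty, PySem.Set.empty) := rfl
  rw [hpu]
  set pu := anchors.foldl (fcwStep pair_rows o proj) (PySem.Dict.empty, PySem.Set.empty) with hdefpu
  have hn : pu.1.keys.Nodup := by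
    rw [hdefpu, fcwStep_fst]
    exact PySem.Dict.nodup_keys_foldl_insert_key anchors
      (fun a => proj (PySem.List.pyGetD pair_rows a.1 (0, 0, 0, 0)))
      (fun _ a => fcwB_nib a.2 o) PySem.Dict.empty (by simp [PySem.Dict.keys_empty])
  have hu : pu.2 = PySem.Set.ofList (anchors.map (fun a => fcwB_nib a.2 o)) := by
    rw [hdefpu, fcwStep_snd, ← PySem.Set.update_map_eq_foldl_add,
      show (PySem.Set.empty : PySem.Set Int) = [] from rfl, PySem.Set.update_nil_left]
  have hval : ∀ pid v, pu.1.get? pid = some v → pu.2.contains v = true := by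
    intro pid v hget
    rw [hdefpu, fcwStep_fst] at hget
    rcases fcw_value_mem pair_rows o proj anchors PySem.Dict.empty pid v hget with h | h
    · rw [PySem.Dict.get?_empty] at h; simp at h
    · rw [hu, PySem.Set.contains_iff, PySem.Set.mem_ofList]; exact h
  cases hc : pu.2.contains (fcwB_nib target o) with
  | true =>
    simp only [hc, if_true]
    refine List.filter_congr (fun i _ => ?_)
    exact (fcw_ok_true pu.1 pu.2 _ _ hn hc).symm
  | false =>
    simp only [hc, Bool.false_eq_true, if_false]
    refine List.filter_congr (fun i _ => ?_)
    exact (fcw_ok_false pu.1 pu.2 _ _ (hval _) hc).symm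

-- ===== VERDICT (by name: the statement is the Claim_ definition above) =====
theorem find_candidate_words_spec : Claim_equal_find_candidate_words := by
  intro pair_rows target existing_anchors search_range nibble_order _ _
  unfold Spec_find_candidate_words find_candidate_words find_candidate_words_alt
  rw [fcwA_fold_proj]
  dsimp only
  rw [PySem.List.foldl_append_if (f := fun i : Int => i)]
  simp only [List.map_id', List.nil_append]
  rw [fcw_pass_eq, fcw_pass_eq, fcw_pass_eq, fcw_pass_eq,
    List.filter_filter, List.filter_filter, List.filter_filter]
  refine List.filter_congr (fun i _ => ?_)
  simp only [show fcwA_nib = fcwB_nib from rfl]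
  ac_rfl
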